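-- pv_equiv track=rewrite | github.com/vashu1/data_snippets | _tasks/count_minimum_inserts.py | count_minimum_inserts
-- ===== SOURCE A (Python) =====
-- from bisect import bisect_left
--
-- def count_minimum_inserts(A, B):
--     convert_B_elems_to_index = dict(map(reversed, enumerate(B))) # {elem -> indx}
--     converted_A = [convert_B_elems_to_index[elem] for elem in A if elem in convert_B_elems_to_index]
--     # converted_A = map(lambda x: convert_B_elems_to_index[x], filter(lambda x: x in convert_B_elems_to_index, A))
--     piles = [] # Longest increasing subsequence via patience sorting
--     for elem in converted_A:
--         indx = bisect_left(piles, elem)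
--         if indx == len(piles):
--             piles.append(elem)
--         else:
--             piles[indx] = elem
--     return len(B) - len(piles)
-- ===== SOURCE B (Python) =====
-- def count_minimum_inserts(A, B):
--     index_of = {e: i for i, e in enumerate(B)}
--     conv = [index_of[e] for e in A if e in index_of]
--     seen = []  # (value, length of the best strictly increasing subsequence ending at it)
--     best = 0
--     for x in conv:
--         d = 1 + max((dv for v, dv in seen if v < x), default=0)
--         seen.append((x, d))
--         best = max(best, d)
--     return len(B) - best
-- ===== Notes on version B (the rewrite author's own statement) =====
-- stated objective: alternative
-- what changed: The LIS core is replaced: instead of patience sorting (maintaining a sorted piles list and bisecting into it), B runs a quadratic dynamic program that stores for each processed element the length of the best strictly increasing subsequence ending there and takes the maximum.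
import Mathlib
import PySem

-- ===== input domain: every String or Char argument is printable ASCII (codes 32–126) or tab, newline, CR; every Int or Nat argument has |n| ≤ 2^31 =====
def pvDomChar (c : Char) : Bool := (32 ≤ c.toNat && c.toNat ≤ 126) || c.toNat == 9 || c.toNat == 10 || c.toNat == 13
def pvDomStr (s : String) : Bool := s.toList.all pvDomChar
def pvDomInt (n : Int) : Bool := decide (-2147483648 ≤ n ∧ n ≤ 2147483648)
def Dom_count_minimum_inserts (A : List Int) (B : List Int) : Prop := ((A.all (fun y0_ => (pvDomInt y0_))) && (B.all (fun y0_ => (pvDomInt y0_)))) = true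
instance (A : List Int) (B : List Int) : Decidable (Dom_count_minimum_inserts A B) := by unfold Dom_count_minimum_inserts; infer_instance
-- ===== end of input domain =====

-- B replaces A's patience-sorting LIS core by a quadratic DP over "best increasing
-- subsequence ending at each element" (alternative decomposition, not faster).

-- ===== PORT A =====
-- patience-sorting step: bisect_left into piles, then append or replace
def pvPatStep (piles : List Int) (elem : Int) : List Int :=
  let indx := PySem.List.bisectLeft piles elem   -- bisect_left; piles is kept sorted, exact
  if indx = piles.length then piles ++ [elem] else piles.set indx elem

def count_minimum_inserts (A : List Int) (B : List Int) : Int :=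
  -- convert_B_elems_to_index = dict(map(reversed, enumerate(B)))
  let m : PySem.Dict Int Int :=
    (PySem.List.enumerate B).foldl (fun d p => d.insert p.2 p.1) PySem.Dict.empty
  -- converted_A = [m[e] for e in A if e in m]
  let convertedA : List Int := A.filterMap (fun e => m.get? e)
  let piles : List Int := convertedA.foldl pvPatStep []
  (B.length : Int) - (piles.length : Int)

-- ===== PORT B =====
-- max((dv for (v, dv) in seen if v < x), default=0)
def pvMaxBelow (seen : List (Int × Int)) (x : Int) : Int :=
  seen.foldl (fun acc p => if p.1 < x then max acc p.2 else acc) 0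

-- one DP iteration: record (x, dp value), update the running best
def pvDpStep (st : List (Int × Int) × Int) (x : Int) : List (Int × Int) × Int :=
  let d := 1 + pvMaxBelow st.1 x
  (st.1 ++ [(x, d)], max st.2 d)

def count_minimum_inserts_alt (A : List Int) (B : List Int) : Int :=
  -- index_of = {e: i for i, e in enumerate(B)}
  let m : PySem.Dict Int Int :=
    (PySem.List.enumerate B).foldl (fun d p => d.insert p.2 p.1) PySem.Dict.empty
  -- conv = [index_of[e] for e in A if e in index_of]
  let conv : List Int := A.filterMap (fun e => m.get? e)
  let st := conv.foldl pvDpStep ([], 0)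
  (B.length : Int) - st.2

-- ===== PRECONDITION & SPEC =====
def Spec_count_minimum_inserts (A : List Int) (B : List Int) (out : Int) : Prop := out = count_minimum_inserts_alt A B
instance (A : List Int) (B : List Int) (out : Int) : Decidable (Spec_count_minimum_inserts A B out) := by unfold Spec_count_minimum_inserts; infer_instance

-- ===== CLAIM (what is proved, stated in full; the proofs are below) =====
def Claim_equal_count_minimum_inserts : Prop := ∀ (A : List Int) (B : List Int), Dom_count_minimum_inserts A B → Spec_count_minimum_inserts A B (count_minimum_inserts A B)

-- ===== LEMMAS AND PROOFS =====

-- On a strictly sorted list, bisect_left is the number of elements below x.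
theorem pv_bisect_eq_filter_length (piles : List Int) (x : Int)
    (h : piles.Pairwise (· < ·)) :
    PySem.List.bisectLeft piles x = (piles.filter (fun a => decide (a < x))).length := by
  obtain ⟨hble, hlt, hge⟩ := PySem.List.bisectLeft_spec piles x (h.imp le_of_lt)
  set b := PySem.List.bisectLeft piles x with hb
  have hdecomp : piles = piles.take b ++ piles.drop b := (List.take_append_drop b piles).symm
  have htake : (piles.take b).filter (fun a => decide (a < x)) = piles.take b := by
    apply List.filter_eq_self.mpr
    intro a ha
    obtain ⟨i, hi, rfl⟩ := List.getElem_of_mem ha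
    have hib : i < b := by
      have := hi; simp [List.length_take] at this; omega
    have hlen : i < piles.length := by
      have := hi; simp [List.length_take] at this; omega
    rw [List.getElem_take]
    simpa using hlt i hlen hib
  have hdrop : (piles.drop b).filter (fun a => decide (a < x)) = [] := by
    apply List.filter_eq_nil_iff.mpr
    intro a ha
    obtain ⟨i, hi, rfl⟩ := List.getElem_of_mem ha
    have hlen : b + i < piles.length := by
      have := hi; simp [List.length_drop] at this; omega
    rw [List.getElem_drop]
    have := hge (b + i) hlen (by omega)
    simpa using this
  conv_rhs => rw [hdecomp]
  rw [List.filter_append, htake, hdrop]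
  simp [List.length_take]
  omega

-- pvMaxBelow over an appended pair
theorem pv_maxBelow_append (seen : List (Int × Int)) (x d y : Int) :
    pvMaxBelow (seen ++ [(x, d)]) y =
      if x < y then max (pvMaxBelow seen y) d else pvMaxBelow seen y := by
  unfold pvMaxBelow
  rw [List.foldl_append]
  simp

-- setting position t1.length of t1 ++ old :: t2
theorem pv_set_middle (t1 : List Int) (old : Int) (t2 : List Int) (x : Int) :
    (t1 ++ old :: t2).set t1.length x = t1 ++ x :: t2 := by
  induction t1 with
  | nil => simp
  | cons a t ih => simp [ih]

-- the invariant carried through one loop iteration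
theorem pv_step_inv (piles : List Int) (seen : List (Int × Int)) (best : Int) (x : Int)
    (h1 : piles.Pairwise (· < ·))
    (h2 : (piles.length : Int) = best)
    (h3 : ∀ y, (((piles.filter (fun a => decide (a < y))).length : Int)) = pvMaxBelow seen y) :
    (pvPatStep piles x).Pairwise (· < ·) ∧
    (((pvPatStep piles x).length : Int)) = (pvDpStep (seen, best) x).2 ∧
    ∀ y, ((((pvPatStep piles x).filter (fun a => decide (a < y))).length : Int))
          = pvMaxBelow (pvDpStep (seen, best) x).1 y := by
  have hbf := pv_bisect_eq_filter_length piles x h1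
  set b := PySem.List.bisectLeft piles x with hbdef
  have hd : 1 + pvMaxBelow seen x = (b : Int) + 1 := by
    rw [← h3 x, ← hbf]; omega
  obtain ⟨hble, hlt, hge⟩ := PySem.List.bisectLeft_spec piles x (h1.imp le_of_lt)
  by_cases hcase : b = piles.length
  · -- append case: all of piles is < x
    have hall : ∀ a ∈ piles, a < x := by
      intro a ha
      obtain ⟨i, hi, rfl⟩ := List.getElem_of_mem ha
      exact hlt i hi (by omega)
    have hstep : pvPatStep piles x = piles ++ [x] := by
      unfold pvPatStep; simp [← hbdef, hcase]
    have hdp1 : (pvDpStep (seen, best) x).1 = seen ++ [(x, (b : Int) + 1)] := by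
      unfold pvDpStep; simp [hd]
    have hdp2 : (pvDpStep (seen, best) x).2 = (b : Int) + 1 := by
      unfold pvDpStep
      simp only [hd]
      show max best ((b : Int) + 1) = (b : Int) + 1
      omega
    rw [hstep, hdp2]
    refine ⟨?_, ?_, ?_⟩
    · rw [List.pairwise_append]
      exact ⟨h1, List.pairwise_singleton _ _, by intro a ha c hc; simp at hc; subst hc; exact hall a ha⟩
    · simp; omega
    · intro y
      rw [hdp1, pv_maxBelow_append, List.filter_append, ← h3 y]
      by_cases hxy : x < y
      · have hfull : piles.filter (fun a => decide (a < y)) = piles := by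
          apply List.filter_eq_self.mpr
          intro a ha; simpa using lt_trans (hall a ha) hxy
        simp [hxy, hfull]
        omega
      · simp [hxy]
  · -- replace case
    have hblt : b < piles.length := lt_of_le_of_ne hble hcase
    set t1 := piles.take b with ht1
    set t2 := piles.drop (b + 1) with ht2
    have hold : piles = t1 ++ piles[b] :: t2 := by
      rw [ht1, ht2]
      conv_lhs => rw [← List.take_append_drop b piles]
      congr 1
      exact (List.getElem_cons_drop hblt).symm
    set old := piles[b] with holddef
    have ht1len : t1.length = b := by simp [ht1]; omega
    have ht1mem : ∀ a ∈ t1, a < x := by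
      intro a ha
      obtain ⟨i, hi, rfl⟩ := List.getElem_of_mem ha
      have hib : i < b := by have := hi; simp [ht1, List.length_take] at this; omega
      have hilen : i < piles.length := by omega
      have : t1[i] = piles[i] := by simp [ht1, List.getElem_take]
      rw [this]
      exact hlt i hilen hib
    have hxold : x ≤ old := hge b hblt (le_refl b)
    have ht2mem : ∀ a ∈ t2, old < a := by
      intro a ha
      have hpw : List.Pairwise (· < ·) (old :: t2) := by
        have := h1
        rw [hold] at this
        exact (List.pairwise_append.mp this).2.1
      exact (List.pairwise_cons.mp hpw).1 a ha
    have hstep : pvPatStep piles x = t1 ++ x :: t2 := by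
      unfold pvPatStep
      simp only [← hbdef]
      rw [if_neg hcase]
      conv_lhs => rw [hold]
      rw [← ht1len, pv_set_middle]
    have hdp1 : (pvDpStep (seen, best) x).1 = seen ++ [(x, (b : Int) + 1)] := by
      unfold pvDpStep; simp [hd]
    have hdp2 : (pvDpStep (seen, best) x).2 = best := by
      unfold pvDpStep
      simp only [hd]
      show max best ((b : Int) + 1) = best
      omega
    rw [hstep, hdp2]
    refine ⟨?_, ?_, ?_⟩
    · have hpiles := h1
      rw [hold] at hpiles
      rw [List.pairwise_append] at hpiles ⊢
      obtain ⟨hp1, hp2, hp12⟩ := hpiles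
      rw [List.pairwise_cons] at hp2 ⊢
      refine ⟨hp1, ⟨?_, hp2.2⟩, ?_⟩
      · intro a ha; exact lt_of_le_of_lt hxold (ht2mem a ha)
      · intro a ha c hc
        rcases List.mem_cons.mp hc with rfl | hc2
        · exact ht1mem a ha
        · exact hp12 a ha c (List.mem_cons_of_mem _ hc2)
    · rw [← h2, hold]; simp
    · intro y
      rw [hdp1, pv_maxBelow_append, ← h3 y]
      conv_rhs => rw [hold]
      rw [List.filter_append, List.filter_append, List.filter_cons, List.filter_cons]
      by_cases hxy : x < y
      · have ht1filter : t1.filter (fun a => decide (a < y)) = t1 := by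
          apply List.filter_eq_self.mpr
          intro a ha; simpa using lt_trans (ht1mem a ha) hxy
        by_cases holdy : old < y
        · simp [hxy, holdy, ht1filter]
          omega
        · have ht2filter : t2.filter (fun a => decide (a < y)) = [] := by
            apply List.filter_eq_nil_iff.mpr
            intro a ha
            have : old < a := ht2mem a ha
            simp; omega
          simp [hxy, holdy, ht1filter, ht2filter]
          omega
      · have holdy : ¬ (old < y) := by omega
        simp [hxy, holdy]

-- the invariant carried through the whole fold
theorem pv_fold_len (conv : List Int) :
    ∀ (piles : List Int) (seen : List (Int × Int)) (best : Int),
      piles.Pairwise (· < ·) →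
      (piles.length : Int) = best →
      (∀ y, (((piles.filter (fun a => decide (a < y))).length : Int)) = pvMaxBelow seen y) →
      ((conv.foldl pvPatStep piles).length : Int) = (conv.foldl pvDpStep (seen, best)).2 := by
  induction conv with
  | nil => intro piles seen best _ h2 _; simpa using h2
  | cons x rest ih =>
    intro piles seen best h1 h2 h3
    obtain ⟨g1, g2, g3⟩ := pv_step_inv piles seen best x h1 h2 h3
    simp only [List.foldl_cons]
    have : pvDpStep (seen, best) x = ((pvDpStep (seen, best) x).1, (pvDpStep (seen, best) x).2) := rfl
    rw [this]
    exact ih (pvPatStep piles x) _ _ g1 g2 g3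

-- ===== VERDICT (by name: the statement is the Claim_ definition above) =====
theorem count_minimum_inserts_spec : Claim_equal_count_minimum_inserts := by
  intro A B _
  unfold Spec_count_minimum_inserts count_minimum_inserts count_minimum_inserts_alt
  have h := pv_fold_len
    (A.filterMap (fun e =>
      (((PySem.List.enumerate B).foldl (fun d p => d.insert p.2 p.1) PySem.Dict.empty : PySem.Dict Int Int)).get? e))
    [] [] 0 (List.Pairwise.nil) (by simp) (by intro y; simp [pvMaxBelow])
  simp only at h ⊢
  omega
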